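-- pv_equiv track=rewrite | github.com/StoryScriptorg/StoryScript | src/executor.py | check_is_float_full_number
-- ===== SOURCE A (Python) =====
-- def check_is_float_full_number(command) -> bool:
--     if not isinstance(command, str):
--         command = str(command)
--     isInDecimalsBlock = False
--     decimals = ""
--     for i in command:
--         if i == ".":
--             isInDecimalsBlock = True
--             continue
--         if isInDecimalsBlock:
--             decimals += i
--     return bool(decimals != 0 and decimals)
-- ===== SOURCE B (Python) =====
-- def check_is_float_full_number(command) -> bool:
--     # boundary-find then scan: locate the first '.', then ask whether anything
--     # after it is a non-dot character (those are exactly the 'decimals' A collects)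
--     if not isinstance(command, str):
--         command = str(command)
--     idx = command.find('.')
--     if idx == -1:
--         return False
--     return not all(c == '.' for c in command[idx + 1:])
-- ===== Notes on version B (the rewrite author's own statement) =====
-- stated objective: simpler
-- what changed: Replaces the char-by-char flag/accumulator loop that builds a 'decimals' string with a find-the-first-dot boundary test plus an all() scan of the tail for a non-dot character; no string is accumulated.
import Mathlib
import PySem

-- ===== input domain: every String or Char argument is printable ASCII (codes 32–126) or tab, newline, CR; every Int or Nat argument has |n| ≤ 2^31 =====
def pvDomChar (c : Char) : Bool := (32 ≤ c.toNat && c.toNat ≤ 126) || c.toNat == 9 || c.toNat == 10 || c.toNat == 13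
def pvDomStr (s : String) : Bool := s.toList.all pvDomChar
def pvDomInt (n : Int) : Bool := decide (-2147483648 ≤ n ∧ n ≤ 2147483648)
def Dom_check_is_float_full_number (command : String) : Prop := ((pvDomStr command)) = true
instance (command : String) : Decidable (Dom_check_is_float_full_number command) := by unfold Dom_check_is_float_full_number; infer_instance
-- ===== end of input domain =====

-- B replaces A's flag/accumulator loop with find('.') plus an all()-scan of the tail (simpler decomposition).


-- ===== PORT A =====
-- loop body: 'if i == ".": isInDecimalsBlock = True; continue' then 'if isInDecimalsBlock: decimals += i'
def pvStepA (st : Bool × List Char) (i : Char) : Bool × List Char :=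
  if i = '.' then (true, st.2)
  else if st.1 then (st.1, st.2 ++ [i])
  else st

def check_is_float_full_number (command : String) : Bool :=
  -- command is already a str on this signature, so the isinstance branch is not taken
  let st := command.toList.foldl pvStepA (false, [])
  -- bool(decimals != 0 and decimals): 'decimals != 0' is always True (str vs int), so this is decimals ≠ ""
  decide (st.2 ≠ [])

-- ===== PORT B =====
def check_is_float_full_number_alt (command : String) : Bool :=
  let idx := PySem.Str.find command "."
  if idx = -1 then false
  else !((PySem.Str.slice command (some (idx + 1)) none).toList.all (fun c => c == '.'))

-- ===== PRECONDITION & SPEC =====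
def Spec_check_is_float_full_number (command : String) (out : Bool) : Prop := out = check_is_float_full_number_alt command
instance (command : String) (out : Bool) : Decidable (Spec_check_is_float_full_number command out) := by unfold Spec_check_is_float_full_number; infer_instance

-- ===== CLAIM (what is proved, stated in full; the proofs are below) =====
def Claim_equal_check_is_float_full_number : Prop := ∀ (command : String), Dom_check_is_float_full_number command → Spec_check_is_float_full_number command (check_is_float_full_number command)

-- ===== LEMMAS AND PROOFS =====

-- once the flag is set, the loop appends exactly the non-dot characters
theorem pv_foldl_true (l : List Char) (d : List Char) :
    l.foldl pvStepA (true, d) = (true, d ++ l.filter (fun c => c ≠ '.')) := by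
  induction l generalizing d with
  | nil => simp
  | cons c t ih =>
    by_cases hc : c = '.' <;> simp [pvStepA, hc, ih]

-- before any dot is seen, the loop state stays (false, [])
theorem pv_foldl_false (l : List Char) (h : '.' ∉ l) :
    l.foldl pvStepA (false, []) = (false, []) := by
  induction l with
  | nil => rfl
  | cons c t ih =>
    simp only [List.mem_cons, not_or] at h
    simp [pvStepA, Ne.symm h.1, ih h.2]

-- single-character infix is membership
theorem pv_singleton_infix (c : Char) (l : List Char) : [c] <:+: l ↔ c ∈ l := by
  constructor
  · intro h; exact List.singleton_sublist.mp h.sublist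
  · intro h
    obtain ⟨s, t, rfl⟩ := List.append_of_mem h
    exact ⟨s, t, by simp⟩

theorem check_is_float_full_number_eq (command : String) :
    check_is_float_full_number command = check_is_float_full_number_alt command := by
  unfold check_is_float_full_number check_is_float_full_number_alt
  simp only [PySem.Str.find_eq]
  set l := command.toList with hl
  by_cases hmem : '.' ∈ l
  · -- find succeeds
    have hinf : (".".toList) <:+: l := by
      simpa [pv_singleton_infix] using hmem
    have hnonneg : 0 ≤ PySem.Chars.find l ".".toList :=
      (PySem.Chars.find_nonneg_iff l _).mpr hinf
    have hne : PySem.Chars.find l ".".toList ≠ -1 := by omega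
    obtain ⟨hpre, hmin⟩ := PySem.Chars.find_spec hnonneg
    set k := (PySem.Chars.find l ".".toList).toNat with hk
    -- l.drop k starts with '.'
    have hdrop : ∃ t, l.drop k = '.' :: t := by
      obtain ⟨t, ht⟩ := hpre
      exact ⟨t, by simpa using ht.symm⟩
    obtain ⟨t, ht⟩ := hdrop
    have hkl : k < l.length := by
      by_contra h
      have : l.drop k = [] := List.drop_eq_nil_of_le (by omega)
      simp [this] at ht
    -- prefix of l before k contains no dot
    have hnodot : '.' ∉ l.take k := by
      intro hmem'
      obtain ⟨i, hi, hgi⟩ := List.mem_iff_getElem.mp hmem'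
      have hik : i < k := by
        have := hi; simp [List.length_take] at this; omega
      have hil : i < l.length := lt_of_lt_of_le hik (le_of_lt hkl)
      apply hmin i hik
      refine ⟨l.drop (i + 1), ?_⟩
      rw [List.drop_eq_getElem_cons hil]
      have hgi' : l[i] = '.' := by rw [← List.getElem_take (h := hi)]; exact hgi
      simp [hgi']
    -- decompose l = take k ++ '.' :: t, t = l.drop (k+1)
    have hsplit : l = l.take k ++ '.' :: t := by
      conv_lhs => rw [← List.take_append_drop k l, ht]
    have hA : l.foldl pvStepA (false, []) = (true, t.filter (fun c => c ≠ '.')) := by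
      rw [hsplit, List.foldl_append, pv_foldl_false _ hnodot]
      have : pvStepA (false, []) '.' = (true, []) := by simp [pvStepA]
      simp only [List.foldl_cons, this, pv_foldl_true]
      simp
    -- B's slice is t
    have ht' : t = l.drop (k + 1) := by
      have : l.drop (k+1) = (l.drop k).drop 1 := by rw [List.drop_drop]
      rw [this, ht]; rfl
    have hslice : (PySem.Str.slice command (some (PySem.Chars.find l ".".toList + 1)) none).toList = t := by
      rw [PySem.Str.toList_slice, PySem.Chars.slice_eq_listSlice, ← hl,
        PySem.List.slice_from l (by omega : (0:Int) ≤ PySem.Chars.find l ".".toList + 1)]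
      rw [ht']
      congr 1
      omega
    rw [if_neg hne, hA, hslice]
    have key : (t.filter (fun c => decide (c ≠ '.')) = []) ↔ (t.all (fun c => c == '.') = true) := by
      simp [List.filter_eq_nil_iff, List.all_eq_true]
    rcases Bool.eq_false_or_eq_true (t.all (fun c => c == '.')) with hb | hb
    · -- everything after the first '.' is a dot
      have h0 := key.mpr hb
      have hd : decide (t.filter (fun c => decide (c ≠ '.')) ≠ []) = false := by
        rw [h0]; rfl
      rw [hd, hb]; rfl
    · -- some non-dot char after the first '.'
      have hne' : t.filter (fun c => decide (c ≠ '.')) ≠ [] := fun h => by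
        rw [key.mp h] at hb; cases hb
      rw [decide_eq_true hne', hb]; rfl
  · -- no dot: find = -1, A's loop keeps (false, [])
    have : PySem.Chars.find l ".".toList = -1 :=
      (PySem.Chars.find_eq_neg_one_iff l _).mpr (by simpa [pv_singleton_infix] using hmem)
    rw [this, if_pos rfl, pv_foldl_false l hmem]
    simp

-- ===== VERDICT (by name: the statement is the Claim_ definition above) =====
theorem check_is_float_full_number_spec : Claim_equal_check_is_float_full_number := by
  intro command _
  unfold Spec_check_is_float_full_number
  exact check_is_float_full_number_eq command
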